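-- pv_equiv track=rewrite | github.com/tomas-sexenian/Lab2-TeoLeng | programas/programa2.py | obtenerParte
-- ===== SOURCE A (Python) =====
-- def obtenerParte(entry):
--     output=[]
--     if (entry[0]=='('):
--         cantidadParentesis=1
--         output=['(']
--         iterator=1;
--         while (cantidadParentesis>0):
--             output.append(entry[iterator])
--             if (entry[iterator]==')'):
--                 cantidadParentesis=cantidadParentesis-1
--             elif (entry[iterator]=='('):
--                 cantidadParentesis=cantidadParentesis+1
--             iterator=iterator+1
--         output.pop()
--         output.pop(0)
--         for i in range(0,iterator):
--             entry.pop(0)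
--     elif(entry[0]!='not'):
--         output.append(entry[0])
--         entry.pop(0)
--     elif(entry[0]=='not'):
--         for i in range(0,len(entry)):
--             output.append(entry[0])
--             entry.pop(0)
--     return output
-- ===== SOURCE B (Python) =====
-- def obtenerParte(entry):
--     if entry[0] == '(':
--         depth = 1
--         k = 1
--         while depth > 0:
--             c = entry[k]
--             if c == '(':
--                 depth += 1
--             elif c == ')':
--                 depth -= 1
--             k += 1
--         output = entry[1:k-1]
--         del entry[:k]
--     elif entry[0] == 'not':
--         output = entry[:]
--         del entry[:]
--     else:
--         output = [entry.pop(0)]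
--     return output
-- ===== Notes on version B (the rewrite author's own statement) =====
-- stated objective: simpler
-- what changed: B separates boundary-finding from extraction: a depth-counter scan only computes the index k past the matching ')', then a single slice entry[1:k-1] yields the group and one prefix deletion performs the mutation, instead of A's token-by-token append with trailing pop()/pop(0) repairs and per-token pops; the 'not' branch becomes a whole-list copy plus clear instead of a pop-one-append-one loop.
import Mathlib
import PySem

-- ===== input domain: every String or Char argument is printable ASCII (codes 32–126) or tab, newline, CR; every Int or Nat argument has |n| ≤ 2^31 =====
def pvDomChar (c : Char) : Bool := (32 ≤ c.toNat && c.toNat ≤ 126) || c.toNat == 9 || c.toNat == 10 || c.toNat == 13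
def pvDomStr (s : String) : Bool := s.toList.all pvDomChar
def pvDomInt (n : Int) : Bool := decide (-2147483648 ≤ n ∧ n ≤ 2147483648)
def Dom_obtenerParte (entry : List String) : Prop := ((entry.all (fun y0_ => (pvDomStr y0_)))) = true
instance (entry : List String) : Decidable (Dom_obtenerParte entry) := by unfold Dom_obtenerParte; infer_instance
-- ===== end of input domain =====

-- B finds only the index past the matching ')' and extracts by one slice, instead of A's
-- append-every-token-then-pop repairs; both Pythons mutate `entry` identically (pop the consumed
-- prefix), and this file proves equality of the RETURN value.

-- ===== PORT A =====
-- A's while-loop: append entry[iterator], adjust the paren counter, continue while it is > 0.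
-- Python raises IndexError when the scan runs off the list; Pre_ excludes that, here the
-- recursion just stops (base case []).
def pvScanA (rest : List String) (cantidadParentesis : Int) (output : List String) : List String :=
  match rest with
  | [] => output
  | t :: rs =>
    let output := output ++ [t]
    let c := if t = ")" then cantidadParentesis - 1
             else if t = "(" then cantidadParentesis + 1
             else cantidadParentesis
    if c > 0 then pvScanA rs c output else output

-- A's 'not' branch: for i in range(0, len(entry)): output.append(entry[0]); entry.pop(0)
def pvNotLoopA (entry output : List String) (n : Nat) : List String :=
  match n, entry with
  | 0, _ => output
  | _ + 1, [] => output
  | n + 1, h :: t => pvNotLoopA t (output ++ [h]) n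

def obtenerParte (entry : List String) : List String :=
  match entry with
  | [] => []  -- Python: IndexError on entry[0]; excluded by Pre_
  | h :: t =>
    if h = "(" then
      -- output=['('], loop, then output.pop(); output.pop(0)
      ((pvScanA t 1 ["("]).dropLast).tail
    else if h ≠ "not" then [h]
    else pvNotLoopA (h :: t) [] (h :: t).length

-- ===== PORT B =====
-- B's while-loop: only advance k past the matching ')' (depth counter), no accumulation.
def pvScanB (rest : List String) (depth : Int) (k : Nat) : Nat :=
  match rest with
  | [] => k  -- Python: IndexError on entry[k]; excluded by Pre_
  | c :: rs =>
    let d := if c = "(" then depth + 1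
             else if c = ")" then depth - 1
             else depth
    if d > 0 then pvScanB rs d (k + 1) else k + 1

def obtenerParte_alt (entry : List String) : List String :=
  match entry with
  | [] => []  -- Python: IndexError on entry[0]; excluded by Pre_
  | h :: t =>
    if h = "(" then
      let k := pvScanB t 1 1
      PySem.List.slice entry (some (1 : Int)) (some ((k : Int) - 1))
    else if h = "not" then entry
    else [h]

-- ===== PRECONDITION & SPEC =====
-- Pre_: exactly where Python A returns (no IndexError): the list is nonempty, and if it starts
-- with '(' some nonempty prefix is paren-balanced, so the scan finds its closing ')'.
def Pre_obtenerParte (entry : List String) : Prop :=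
  entry ≠ [] ∧
  (entry.headI = "(" →
    ∃ j < entry.length + 1, 1 ≤ j ∧ (entry.take j).count "(" = (entry.take j).count ")")
instance (entry : List String) : Decidable (Pre_obtenerParte entry) := by
  unfold Pre_obtenerParte; infer_instance

def pvWitness_obtenerParte : List String := ["(", "a", ")", "b"]

def Spec_obtenerParte (entry : List String) (out : List String) : Prop := out = obtenerParte_alt entry
instance (entry : List String) (out : List String) : Decidable (Spec_obtenerParte entry out) := by
  unfold Spec_obtenerParte; infer_instance

-- ===== CLAIM (what is proved, stated in full; the proofs are below) =====
def Claim_equal_obtenerParte : Prop :=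
  ∀ (entry : List String), Dom_obtenerParte entry → Pre_obtenerParte entry →
    Spec_obtenerParte entry (obtenerParte entry)

-- ===== LEMMAS AND PROOFS =====

-- B's k is an offset plus a step count independent of k.
theorem pvScanB_shift (rest : List String) (d : Int) (k : Nat) :
    pvScanB rest d k = pvScanB rest d 0 + k := by
  induction rest generalizing d k with
  | nil => simp [pvScanB]
  | cons c rs ih =>
    simp only [pvScanB]
    set d' := if c = "(" then d + 1 else if c = ")" then d - 1 else d with hd'
    by_cases h : d' > 0
    · simp only [if_pos h]
      rw [ih d' (k + 1), ih d' 1]; omega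
    · simp only [if_neg h]; omega

-- A's scan output is its input output followed by the first (pvScanB rest d 0) tokens of rest.
theorem pvScanA_eq_take (rest : List String) (d : Int) (out : List String) (hd : 0 < d) :
    pvScanA rest d out = out ++ rest.take (pvScanB rest d 0) := by
  induction rest generalizing d out with
  | nil => simp [pvScanA, pvScanB]
  | cons c rs ih =>
    simp only [pvScanA, pvScanB]
    have hsame : (if c = ")" then d - 1 else if c = "(" then d + 1 else d)
        = (if c = "(" then d + 1 else if c = ")" then d - 1 else d) := by
      by_cases h1 : c = "("
      · simp [h1]
      · by_cases h2 : c = ")" <;> simp [h1, h2]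
    rw [hsame]
    set d' := (if c = "(" then d + 1 else if c = ")" then d - 1 else d) with hd'
    by_cases h : d' > 0
    · simp only [if_pos h]
      rw [ih d' (out ++ [c]) h, pvScanB_shift rs d' 1]
      simp [List.take_succ_cons, List.append_assoc]
    · simp [if_neg h, List.take_succ_cons]

-- A's 'not' loop copies the whole list when the counter equals its length.
theorem pvNotLoopA_copy (entry out : List String) :
    pvNotLoopA entry out entry.length = out ++ entry := by
  induction entry generalizing out with
  | nil => simp [pvNotLoopA]
  | cons h t ih => simp [pvNotLoopA, ih (out ++ [h]), List.append_assoc]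

-- Each scan step consumes one element of rest.
theorem pvScanB_le_length (rest : List String) (d : Int) :
    pvScanB rest d 0 ≤ rest.length := by
  induction rest generalizing d with
  | nil => simp [pvScanB]
  | cons c rs ih =>
    simp only [pvScanB]
    set d' := if c = "(" then d + 1 else if c = ")" then d - 1 else d with hd'
    by_cases h : d' > 0
    · simp only [if_pos h]
      rw [pvScanB_shift rs d' 1]
      have := ih d'
      simp; omega
    · simp only [if_neg h]; simp

-- ===== VERDICT (by name: the statement is the Claim_ definition above) =====
theorem obtenerParte_spec : Claim_equal_obtenerParte := by
  intro entry _ _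
  unfold Spec_obtenerParte obtenerParte obtenerParte_alt
  match entry with
  | [] => rfl
  | h :: t =>
    by_cases hp : h = "("
    · simp only [if_pos hp]
      rw [pvScanA_eq_take t 1 ["("] (by norm_num), pvScanB_shift t 1 1]
      have hle := pvScanB_le_length t 1
      have hcast : ((pvScanB t 1 0 + 1 : Nat) : Int) - 1 = ((pvScanB t 1 0 : Nat) : Int) := by
        push_cast; ring
      rw [hcast, show ((1 : Int)) = ((1 : Nat) : Int) from rfl, PySem.List.slice_natCast]
      cases hnv : pvScanB t 1 0 with
      | zero => simp
      | succ m =>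
        rw [hnv] at hle
        have hlen : (t.take (m + 1)).length = m + 1 := by
          rw [List.length_take]; omega
        have hne : t.take (m + 1) ≠ [] := by
          intro hnil; rw [hnil] at hlen; simp at hlen
        simp only [List.cons_append, List.nil_append]
        rw [List.dropLast_cons_of_ne_nil hne, List.tail_cons, List.dropLast_eq_take, hlen]
        simp [List.take_take]
    · by_cases hnn : h = "not"
      · subst hnn
        have h1 := pvNotLoopA_copy ("not" :: t) []
        simp only [if_neg hp, ne_eq, not_true_eq_false] at *
        simp at h1 ⊢
        exact h1
      · simp [if_neg hp, hnn]
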